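-- pv_equiv track=rewrite | github.com/BorisWinc/for-loops | main.py | alphabet_set
-- ===== SOURCE A (Python) =====
-- def alphabet_set(countries):
--     alphabet = list('abcdefghijklmnopqrstuvwxyz')
--     found_countries = []
--     for country in countries:
--         for char in country:
--             if char.lower() in alphabet:
--                 alphabet.remove(char.lower())
--                 found_countries.append(country)
--     return  found_countries
-- ===== SOURCE B (Python) =====
-- def alphabet_set(countries):
--     counts = [0] * len(countries)
--     for letter in 'abcdefghijklmnopqrstuvwxyz':
--         for i, country in enumerate(countries):
--             if letter in country.lower():
--                 counts[i] += 1
--                 break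
--     result = []
--     for country, k in zip(countries, counts):
--         result += [country] * k
--     return result
-- ===== Notes on version B (the rewrite author's own statement) =====
-- stated objective: alternative
-- what changed: Inverts the iteration order: instead of A's country-major char scan removing letters from a shrinking alphabet list, B is letter-major - for each of the 26 letters it finds the first country containing it, tallies per-country counts, then emits each country replicated by its count.
import Mathlib
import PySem

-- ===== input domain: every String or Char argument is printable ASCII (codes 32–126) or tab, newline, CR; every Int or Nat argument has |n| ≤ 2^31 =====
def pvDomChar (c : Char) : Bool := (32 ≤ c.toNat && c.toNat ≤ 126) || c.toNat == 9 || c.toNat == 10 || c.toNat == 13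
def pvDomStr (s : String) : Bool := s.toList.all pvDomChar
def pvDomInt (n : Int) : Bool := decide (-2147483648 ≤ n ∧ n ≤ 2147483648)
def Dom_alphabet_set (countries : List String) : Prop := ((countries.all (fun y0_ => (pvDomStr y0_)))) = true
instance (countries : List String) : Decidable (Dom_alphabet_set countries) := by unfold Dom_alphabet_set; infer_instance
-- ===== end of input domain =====

-- B inverts the iteration: instead of A's country-major scan that removes letters from a
-- shrinking alphabet list, B goes letter-major — for each of the 26 letters it finds the
-- first country containing it, tallies per-country counts, and emits each country
-- replicated by its count (objective: alternative; same return value, no mutation).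

-- ===== PORT A =====
-- Python's list.remove is only reached under the membership guard, so it is List.erase
-- (removal of the first occurrence) and never raises.
def alphabet_set (countries : List String) : List String :=
  (countries.foldl (fun (st : List Char × List String) country =>
      country.toList.foldl (fun st c =>
          if PySem.Chars.lowerChar c ∈ st.1 then
            (st.1.erase (PySem.Chars.lowerChar c), st.2 ++ [country])
          else st) st)
    ("abcdefghijklmnopqrstuvwxyz".toList, [])).2

-- ===== PORT B =====
-- `letter in country.lower()`
def pvLowerHas (letter : Char) (country : String) : Bool :=
  decide (letter ∈ (PySem.Str.lower country).toList)

-- the inner `for i, country in enumerate(countries): if …: counts[i] += 1; break` loop,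
-- returning the index it broke at (the increment is applied by the caller)
def pvFirstIdx (letter : Char) : List String → Nat → Option Nat
  | [], _ => none
  | c :: rest, i => if pvLowerHas letter c then some i else pvFirstIdx letter rest (i + 1)

def alphabet_set_alt (countries : List String) : List String :=
  let counts : List Nat :=
    "abcdefghijklmnopqrstuvwxyz".toList.foldl
      (fun counts letter =>
        match pvFirstIdx letter countries 0 with
        | some i => counts.set i (counts.getD i 0 + 1)
        | none => counts)
      (List.replicate countries.length 0)
  (countries.zip counts).foldl
    (fun acc (ck : String × Nat) => acc ++ List.replicate ck.2 ck.1) []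

-- ===== PRECONDITION & SPEC =====
def Spec_alphabet_set (countries : List String) (out : List String) : Prop := out = alphabet_set_alt countries
instance (countries : List String) (out : List String) : Decidable (Spec_alphabet_set countries out) := by unfold Spec_alphabet_set; infer_instance

-- ===== CLAIM (what is proved, stated in full; the proofs are below) =====
def Claim_equal_alphabet_set : Prop := ∀ (countries : List String), Dom_alphabet_set countries → Spec_alphabet_set countries (alphabet_set countries)

-- ===== LEMMAS AND PROOFS =====

def pvAz : List Char := "abcdefghijklmnopqrstuvwxyz".toList
def pvLows (s : String) : List Char := s.toList.map PySem.Chars.lowerChar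

-- canonical form both programs are reduced to: each country replicated by the number of
-- still-unclaimed (per predicate p) letters it contains
def pvBuild : (Char → Bool) → List String → List String
  | _, [] => []
  | p, c :: rest =>
      List.replicate ((pvAz.filter (fun x => p x && decide (x ∈ pvLows c))).length) c ++
        pvBuild (fun x => p x && !decide (x ∈ pvLows c)) rest

def pvCnt : (Char → Bool) → List String → List Nat
  | _, [] => []
  | p, c :: rest =>
      (pvAz.filter (fun x => p x && decide (x ∈ pvLows c))).length ::
        pvCnt (fun x => p x && !decide (x ∈ pvLows c)) rest

-- two duplicate-free lists with the same members have the same length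
lemma pv_nodup_len_eq (l₁ l₂ : List Char)
    (h₁ : l₁.Nodup) (h₂ : l₂.Nodup) (hm : ∀ x, x ∈ l₁ ↔ x ∈ l₂) :
    l₁.length = l₂.length :=
  ((List.perm_ext_iff_of_nodup h₁ h₂).mpr hm).length_eq

-- A's inner character loop, characterised: the alphabet loses exactly the lowered
-- letters of the country it contained, and the country is appended once per such letter.
lemma pv_innerA (country : String) (cs : List Char) (al : List Char) (found : List String)
    (hnd : al.Nodup) :
    cs.foldl (fun st c =>
        if PySem.Chars.lowerChar c ∈ st.1 then
          (st.1.erase (PySem.Chars.lowerChar c), st.2 ++ [country])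
        else st) (al, found)
    = (al.filter (fun x => decide (x ∉ cs.map PySem.Chars.lowerChar)),
       found ++ List.replicate (al.filter (fun x => decide (x ∈ cs.map PySem.Chars.lowerChar))).length country) := by
  induction cs generalizing al found with
  | nil => simp
  | cons c rest ih =>
    simp only [List.foldl_cons]
    by_cases h : PySem.Chars.lowerChar c ∈ al
    · rw [if_pos h, ih _ _ (hnd.erase _)]
      simp only [Prod.mk.injEq]
      refine ⟨?_, ?_⟩
      · rw [hnd.erase_eq_filter, List.filter_filter]
        apply List.filter_congr
        intro x _
        by_cases hx : x = PySem.Chars.lowerChar c <;>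
          by_cases hr : x ∈ rest.map PySem.Chars.lowerChar <;>
          simp [hx, hr, List.map_cons, List.mem_cons]
      · rw [List.append_assoc, List.singleton_append, ← List.replicate_succ]
        refine congrArg (fun k => found ++ List.replicate k country) ?_
        refine Eq.symm (pv_nodup_len_eq
          (al.filter (fun x => decide (x ∈ List.map PySem.Chars.lowerChar (c :: rest))))
          (PySem.Chars.lowerChar c ::
            (al.erase (PySem.Chars.lowerChar c)).filter
              (fun x => decide (x ∈ List.map PySem.Chars.lowerChar rest))) ?_ ?_ ?_)
        · exact hnd.filter _
        · refine List.nodup_cons.mpr ⟨fun hmem => ?_, (hnd.erase _).filter _⟩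
          exact hnd.not_mem_erase (List.mem_filter.mp hmem).1
        · intro x
          simp only [List.mem_filter, List.mem_cons, List.map_cons, decide_eq_true_eq,
            hnd.mem_erase_iff]
          by_cases hx : x = PySem.Chars.lowerChar c
          · subst hx; tauto
          · tauto
    · rw [if_neg h, ih _ _ hnd]
      simp only [Prod.mk.injEq]
      refine ⟨List.filter_congr ?_, ?_⟩
      · intro x hx
        have hxne : x ≠ PySem.Chars.lowerChar c := fun he => h (he ▸ hx)
        simp [List.map_cons, List.mem_cons, hxne]
      · refine congrArg (fun k => found ++ List.replicate k country) ?_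
        refine congrArg List.length (List.filter_congr ?_)
        intro x hx
        have hxne : x ≠ PySem.Chars.lowerChar c := fun he => h (he ▸ hx)
        simp [List.map_cons, List.mem_cons, hxne]

-- A's outer loop reaches pvBuild
lemma pv_A_build (countries : List String) : ∀ (p : Char → Bool) (found : List String),
    (countries.foldl (fun (st : List Char × List String) country =>
        country.toList.foldl (fun st c =>
            if PySem.Chars.lowerChar c ∈ st.1 then
              (st.1.erase (PySem.Chars.lowerChar c), st.2 ++ [country])
            else st) st) (pvAz.filter p, found)).2
    = found ++ pvBuild p countries := by
  induction countries with
  | nil => intro p found; simp [pvBuild]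
  | cons c rest ih =>
    intro p found
    simp only [List.foldl_cons]
    rw [pv_innerA c c.toList (pvAz.filter p) found ((by decide : pvAz.Nodup).filter p),
      List.filter_filter, List.filter_filter]
    have h1 : (fun x => decide (x ∉ c.toList.map PySem.Chars.lowerChar) && p x)
        = (fun x => p x && !decide (x ∈ pvLows c)) := by
      funext x
      by_cases hm : x ∈ c.toList.map PySem.Chars.lowerChar <;> simp [pvLows, hm, Bool.and_comm]
    have h2 : (fun x => decide (x ∈ c.toList.map PySem.Chars.lowerChar) && p x)
        = (fun x => p x && decide (x ∈ pvLows c)) := by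
      funext x
      by_cases hm : x ∈ c.toList.map PySem.Chars.lowerChar <;> simp [pvLows, hm, Bool.and_comm]
    rw [h1, h2, ih, pvBuild, List.append_assoc]

-- pvFirstIdx at offset i is pvFirstIdx at 0 shifted
lemma pv_firstIdx_shift (letter : Char) (cs : List String) (i : Nat) :
    pvFirstIdx letter cs i = (pvFirstIdx letter cs 0).map (· + i) := by
  induction cs generalizing i with
  | nil => simp [pvFirstIdx]
  | cons c rest ih =>
    simp only [pvFirstIdx]
    by_cases h : pvLowerHas letter c
    · simp [h]
    · rw [if_neg h, if_neg h, ih (i + 1), ih 1]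
      cases pvFirstIdx letter rest 0 <;> simp <;> omega

lemma pv_lowerHas_iff (x : Char) (c : String) :
    pvLowerHas x c = decide (x ∈ pvLows c) := by
  simp [pvLowerHas, pvLows, PySem.Str.toList_lower, PySem.Chars.lower]

lemma pv_firstIdx_cons_zero (x : Char) (c : String) (rest : List String) :
    (pvFirstIdx x (c :: rest) 0 == some 0) = decide (x ∈ pvLows c) := by
  by_cases hm : x ∈ pvLows c
  · have h : pvLowerHas x c = true := by rw [pv_lowerHas_iff]; simpa using hm
    simp [pvFirstIdx, h, hm]
  · have h : pvLowerHas x c = false := by rw [pv_lowerHas_iff]; simpa using hm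
    simp only [pvFirstIdx, h, Bool.false_eq_true, if_false, pv_firstIdx_shift x rest 1]
    cases pvFirstIdx x rest 0 <;> simp [hm]

lemma pv_firstIdx_cons_succ (x : Char) (c : String) (rest : List String) (i : Nat)
    (hm : x ∉ pvLows c) :
    (pvFirstIdx x (c :: rest) 0 == some (i + 1)) = (pvFirstIdx x rest 0 == some i) := by
  have h : pvLowerHas x c = false := by rw [pv_lowerHas_iff]; simpa using hm
  simp only [pvFirstIdx, h, Bool.false_eq_true, if_false, pv_firstIdx_shift x rest 1]
  cases pvFirstIdx x rest 0 <;> simp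

-- pointwise effect of the letter-tally fold
lemma pv_tally (countries : List String) (ls : List Char) :
    ∀ (counts0 : List Nat) (i : Nat),
    (ls.foldl (fun counts letter =>
        match pvFirstIdx letter countries 0 with
        | some j => counts.set j (counts.getD j 0 + 1)
        | none => counts) counts0)[i]?
    = (counts0[i]?).map
        (· + (ls.filter (fun L => pvFirstIdx L countries 0 == some i)).length) := by
  induction ls with
  | nil => intro counts0 i; cases h : counts0[i]? <;> simp [h]
  | cons L ls ih =>
    intro counts0 i
    simp only [List.foldl_cons, List.filter_cons]
    cases hfi : pvFirstIdx L countries 0 with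
    | none =>
      rw [ih]
      simp
    | some j =>
      rw [ih]
      by_cases hij : j = i
      · subst hij
        rw [List.getElem?_set_self']
        cases hv : counts0[j]? with
        | none => simp [hv]
        | some v =>
          simp [hv]; omega
      · rw [List.getElem?_set_ne hij]
        simp [hij]

-- the tallied counts coincide with pvCnt, pointwise
lemma pv_cnt_get (countries : List String) : ∀ (p : Char → Bool) (i : Nat),
    (pvCnt p countries)[i]?
    = (countries[i]?).map (fun _ =>
        (pvAz.filter (fun L => p L && (pvFirstIdx L countries 0 == some i))).length) := by
  induction countries with
  | nil => intro p i; simp [pvCnt]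
  | cons c rest ih =>
    intro p i
    cases i with
    | zero =>
      simp only [pvCnt, List.getElem?_cons_zero, Option.map_some, Option.some.injEq]
      refine congrArg List.length (List.filter_congr ?_)
      intro x _
      rw [pv_firstIdx_cons_zero]
    | succ i =>
      simp only [pvCnt, List.getElem?_cons_succ]
      rw [ih]
      cases hrest : rest[i]? with
      | none => simp
      | some v =>
        simp only [Option.map_some, Option.some.injEq]
        refine congrArg List.length (List.filter_congr ?_)
        intro x _
        by_cases hm : x ∈ pvLows c
        · have h0 : (pvFirstIdx x (c :: rest) 0 == some (i + 1)) = false := by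
            have h : pvLowerHas x c = true := by rw [pv_lowerHas_iff]; simpa using hm
            simp [pvFirstIdx, h]
          simp [h0, hm]
        · rw [pv_firstIdx_cons_succ x c rest i hm]
          have hx : decide (x ∈ pvLows c) = false := by simpa using hm
          simp [hx]

-- the tallied counts ARE pvCnt (fun _ => true)
lemma pv_counts_eq (countries : List String) :
    pvAz.foldl (fun counts letter =>
        match pvFirstIdx letter countries 0 with
        | some j => counts.set j (counts.getD j 0 + 1)
        | none => counts) (List.replicate countries.length 0)
    = pvCnt (fun _ => true) countries := by
  apply List.ext_getElem?
  intro i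
  rw [pv_tally, pv_cnt_get]
  by_cases h : i < countries.length
  · rw [List.getElem?_replicate_of_lt h, List.getElem?_eq_getElem h]
    simp
  · rw [List.getElem?_eq_none (by simpa using h), List.getElem?_eq_none (by omega)]
    simp

-- the emission fold over zip reaches pvBuild
lemma pv_B_build (countries : List String) : ∀ (p : Char → Bool) (acc : List String),
    (countries.zip (pvCnt p countries)).foldl
      (fun acc (ck : String × Nat) => acc ++ List.replicate ck.2 ck.1) acc
    = acc ++ pvBuild p countries := by
  induction countries with
  | nil => intro p acc; simp [pvCnt, pvBuild]
  | cons c rest ih =>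
    intro p acc
    simp only [pvCnt, pvBuild, List.zip_cons_cons, List.foldl_cons]
    rw [ih, List.append_assoc]

-- ===== VERDICT (by name: the statement is the Claim_ definition above) =====
theorem alphabet_set_spec : Claim_equal_alphabet_set := by
  intro countries _
  unfold Spec_alphabet_set alphabet_set alphabet_set_alt
  have haz : "abcdefghijklmnopqrstuvwxyz".toList = pvAz.filter (fun _ => true) := by decide
  rw [haz]
  rw [pv_A_build countries (fun _ => true) []]
  have : pvAz.filter (fun _ => true) = pvAz := by simp
  rw [this, pv_counts_eq, pv_B_build]
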